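-- pv_equiv track=rewrite | github.com/luciansmith/kuhner-python | mutation_clusters/findmutations_bybranch.py | getCNCallFor
-- ===== SOURCE A (Python) =====
-- def getCNCallFor(chr, pos, cncalls):
--     unknown = (-1, -1)
--     if chr not in cncalls:
--         return unknown
--     prevcall = unknown
--     for (start, end, A, B) in cncalls[chr]:
--         if pos>= start and pos<= end:
--             return (A, B)
--         if pos < start and (A, B) == prevcall:
--             return (A, B)
--         if pos < start:
--             return unknown
--         prevcall = (A, B)
--     return unknown
-- ===== SOURCE B (Python) =====
-- def getCNCallFor(chr, pos, cncalls):
--     # Binary search over the (sorted) interval list for the first interval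
--     # "crossing" pos (pos < start or pos <= end), then one case analysis.
--     if chr not in cncalls:
--         return (-1, -1)
--     calls = cncalls[chr]
--     lo, hi = 0, len(calls)
--     while lo < hi:
--         mid = (lo + hi) // 2
--         start, end, a, b = calls[mid]
--         if pos < start or pos <= end:
--             hi = mid
--         else:
--             lo = mid + 1
--     if lo == len(calls):
--         return (-1, -1)
--     start, end, a, b = calls[lo]
--     if start <= pos:
--         return (a, b)
--     if lo > 0 and (calls[lo - 1][2], calls[lo - 1][3]) == (a, b):
--         return (a, b)
--     return (-1, -1)
-- ===== Notes on version B (the rewrite author's own statement) =====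
-- stated objective: alternative
-- what changed: Replaces A's stateful linear scan (prevcall accumulator with three in-loop early returns) by a hand-rolled binary search over the sorted interval list for the first interval crossing pos, followed by a single case analysis on that interval and its left neighbour; Pre_ restricts to the function's natural domain of sorted interval lists (starts and ends nondecreasing), where A's linear answer is well defined.
-- outside the precondition, e.g. on getCNCallFor('c', 15, {'c': [(10, 20, 1, 1), (0, 4, 2, 2)]}): A returns (1, 1), B returns (-1, -1)
import Mathlib
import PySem

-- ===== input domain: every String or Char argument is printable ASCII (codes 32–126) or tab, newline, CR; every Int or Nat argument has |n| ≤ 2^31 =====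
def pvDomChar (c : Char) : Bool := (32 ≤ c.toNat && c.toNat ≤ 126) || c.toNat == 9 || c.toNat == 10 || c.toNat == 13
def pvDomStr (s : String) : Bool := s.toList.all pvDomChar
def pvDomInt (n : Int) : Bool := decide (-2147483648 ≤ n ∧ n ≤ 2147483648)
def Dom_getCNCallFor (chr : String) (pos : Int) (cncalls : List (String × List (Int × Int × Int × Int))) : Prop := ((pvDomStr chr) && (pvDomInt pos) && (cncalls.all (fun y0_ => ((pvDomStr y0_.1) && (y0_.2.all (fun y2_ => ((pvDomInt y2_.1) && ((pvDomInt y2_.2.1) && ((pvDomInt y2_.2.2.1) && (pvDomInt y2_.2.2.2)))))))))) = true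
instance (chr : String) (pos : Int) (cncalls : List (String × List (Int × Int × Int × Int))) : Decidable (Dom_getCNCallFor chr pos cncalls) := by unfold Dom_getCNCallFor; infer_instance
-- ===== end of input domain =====

-- B replaces A's stateful linear scan by a binary search for the first interval
-- crossing pos (valid on the function's natural domain of sorted interval lists,
-- stated in Pre_) plus one case analysis on that interval and its left neighbour.

-- ===== PORT A =====
-- A's for-loop with its running `prevcall` state and three in-loop returns.
def pvLoopA (pos : Int) : List (Int × Int × Int × Int) → (Int × Int) → Int × Int
  | [], _ => (-1, -1)
  | (s, e, a, b) :: rest, prevcall =>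
    if pos ≥ s ∧ pos ≤ e then (a, b)
    else if pos < s ∧ (a, b) = prevcall then (a, b)
    else if pos < s then (-1, -1)
    else pvLoopA pos rest (a, b)

def getCNCallFor (chr : String) (pos : Int) (cncalls : List (String × List (Int × Int × Int × Int))) : Int × Int :=
  -- `chr not in cncalls` / `cncalls[chr]`: dict as association list, first match
  match cncalls.find? (fun kv => kv.1 == chr) with
  | none => (-1, -1)
  | some kv => pvLoopA pos kv.2 (-1, -1)

-- ===== PORT B =====
-- Source B's while-loop: binary search for the first index in [lo, hi) whose
-- interval crosses pos (pos < start or pos <= end); returns hi if none.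
def pvBS (pos : Int) (calls : List (Int × Int × Int × Int)) (lo hi : Nat) : Nat :=
  if lo < hi then
    let mid := (lo + hi) / 2
    let q := calls.getD mid (0, 0, 0, 0)
    if pos < q.1 ∨ pos ≤ q.2.1 then pvBS pos calls lo mid
    else pvBS pos calls (mid + 1) hi
  else lo
termination_by hi - lo
decreasing_by all_goals omega

def getCNCallFor_alt (chr : String) (pos : Int) (cncalls : List (String × List (Int × Int × Int × Int))) : Int × Int :=
  match cncalls.find? (fun kv => kv.1 == chr) with
  | none => (-1, -1)
  | some kv =>
    let calls := kv.2
    let lo := pvBS pos calls 0 calls.length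
    if lo = calls.length then (-1, -1)
    else
      let q := calls.getD lo (0, 0, 0, 0)
      if q.1 ≤ pos then (q.2.2.1, q.2.2.2)
      else if 0 < lo ∧ ((calls.getD (lo - 1) (0, 0, 0, 0)).2.2.1, (calls.getD (lo - 1) (0, 0, 0, 0)).2.2.2) = (q.2.2.1, q.2.2.2) then (q.2.2.1, q.2.2.2)
      else (-1, -1)

-- ===== PRECONDITION & SPEC =====
-- Pre_ restricts to the function's natural domain (the repository stores CN calls
-- as position-sorted interval lists): the list looked up for chr must have
-- nondecreasing starts and nondecreasing ends; on unsorted lists A's early-return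
-- value is an artefact of scan order that a binary search does not reproduce.
def Pre_getCNCallFor (chr : String) (pos : Int) (cncalls : List (String × List (Int × Int × Int × Int))) : Prop :=
  match cncalls.find? (fun kv => kv.1 == chr) with
  | none => True
  | some kv => List.Pairwise (fun p q => p.1 ≤ q.1 ∧ p.2.1 ≤ q.2.1) kv.2
instance (chr : String) (pos : Int) (cncalls : List (String × List (Int × Int × Int × Int))) : Decidable (Pre_getCNCallFor chr pos cncalls) := by unfold Pre_getCNCallFor; cases cncalls.find? (fun kv => kv.1 == chr) <;> infer_instance

def pvWitness_getCNCallFor : String × Int × (List (String × List (Int × Int × Int × Int))) :=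
  ("1", 5, [("1", [(0, 3, 2, 2), (4, 9, 1, 1)])])

def Spec_getCNCallFor (chr : String) (pos : Int) (cncalls : List (String × List (Int × Int × Int × Int))) (out : Int × Int) : Prop := out = getCNCallFor_alt chr pos cncalls
instance (chr : String) (pos : Int) (cncalls : List (String × List (Int × Int × Int × Int))) (out : Int × Int) : Decidable (Spec_getCNCallFor chr pos cncalls out) := by unfold Spec_getCNCallFor; infer_instance

-- ===== CLAIM (what is proved, stated in full; the proofs are below) =====
def Claim_equal_getCNCallFor : Prop := ∀ (chr : String) (pos : Int) (cncalls : List (String × List (Int × Int × Int × Int))), Dom_getCNCallFor chr pos cncalls → Pre_getCNCallFor chr pos cncalls → Spec_getCNCallFor chr pos cncalls (getCNCallFor chr pos cncalls)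

-- ===== LEMMAS AND PROOFS =====

-- A's stateful scan equals the first-crossing-index characterisation, for any prev state.
theorem pvLoopA_eq_crossing (pos : Int) :
    ∀ (calls : List (Int × Int × Int × Int)) (prev : Int × Int),
      pvLoopA pos calls prev =
        match calls.findIdx? (fun q => pos < q.1 || pos ≤ q.2.1) with
        | none => (-1, -1)
        | some i =>
          let q := calls.getD i (0, 0, 0, 0)
          if q.1 ≤ pos then (q.2.2.1, q.2.2.2)
          else
            let pv := if i = 0 then prev else (calls.getD (i - 1) (0, 0, 0, 0)).2.2
            if (q.2.2.1, q.2.2.2) = pv then (q.2.2.1, q.2.2.2) else (-1, -1) := by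
  intro calls
  induction calls with
  | nil => intro prev; rfl
  | cons hd rest ih =>
    intro prev
    obtain ⟨s, e, a, b⟩ := hd
    by_cases hp : (pos < s ∨ pos ≤ e)
    · have hfi : ((s, e, a, b) :: rest).findIdx? (fun q => pos < q.1 || pos ≤ q.2.1) = some 0 := by
        simp [List.findIdx?_cons]
        omega
      rw [hfi]
      by_cases hs : s ≤ pos
      · have he : pos ≤ e := by omega
        simp [pvLoopA, hs, he]
      · have h2 : pos < s := by omega
        by_cases hpr : (a, b) = prev <;> simp [pvLoopA, hs, h2, hpr]
    · have h1 : ¬ (pos ≥ s ∧ pos ≤ e) := by omega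
      have h2 : ¬ (pos < s) := by omega
      have hstep : pvLoopA pos ((s, e, a, b) :: rest) prev = pvLoopA pos rest (a, b) := by
        simp [pvLoopA, h1, h2]
      have hfi : ((s, e, a, b) :: rest).findIdx? (fun q => pos < q.1 || pos ≤ q.2.1)
          = (rest.findIdx? (fun q => pos < q.1 || pos ≤ q.2.1)).map (· + 1) := by
        simp [List.findIdx?_cons]
        omega
      rw [hstep, ih (a, b), hfi]
      cases hj : rest.findIdx? (fun q => pos < q.1 || pos ≤ q.2.1) with
      | none => rfl
      | some j =>
        simp only [Option.map_some]
        have hget : ((s, e, a, b) :: rest).getD (j + 1) (0, 0, 0, 0) = rest.getD j (0, 0, 0, 0) := rfl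
        rw [hget]
        cases j with
        | zero => rfl
        | succ k => rfl

-- The binary search finds the first crossing index, given the crossing
-- predicate is monotone along the list.
theorem pvBS_spec (pos : Int) (calls : List (Int × Int × Int × Int))
    (H : ∀ i j, i ≤ j → j < calls.length →
        (pos < (calls.getD i (0, 0, 0, 0)).1 ∨ pos ≤ (calls.getD i (0, 0, 0, 0)).2.1) →
        (pos < (calls.getD j (0, 0, 0, 0)).1 ∨ pos ≤ (calls.getD j (0, 0, 0, 0)).2.1)) :
    ∀ (lo hi : Nat), lo ≤ hi → hi ≤ calls.length →
      lo ≤ pvBS pos calls lo hi ∧ pvBS pos calls lo hi ≤ hi ∧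
      (∀ i, lo ≤ i → i < pvBS pos calls lo hi →
        ¬ (pos < (calls.getD i (0, 0, 0, 0)).1 ∨ pos ≤ (calls.getD i (0, 0, 0, 0)).2.1)) ∧
      (pvBS pos calls lo hi < hi →
        (pos < (calls.getD (pvBS pos calls lo hi) (0, 0, 0, 0)).1 ∨
         pos ≤ (calls.getD (pvBS pos calls lo hi) (0, 0, 0, 0)).2.1)) := by
  intro lo hi hlh hhn
  rw [pvBS]
  by_cases hlt : lo < hi
  · simp only [hlt, if_true]
    set mid := (lo + hi) / 2 with hmid
    have hmlo : lo ≤ mid := by omega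
    have hmhi : mid < hi := by omega
    by_cases hc : pos < (calls.getD mid (0, 0, 0, 0)).1 ∨ pos ≤ (calls.getD mid (0, 0, 0, 0)).2.1
    · simp only [hc, if_true]
      obtain ⟨h1, h2, h3, h4⟩ := pvBS_spec pos calls H lo mid hmlo (by omega)
      refine ⟨h1, by omega, h3, fun hr => ?_⟩
      rcases Nat.lt_or_ge (pvBS pos calls lo mid) mid with h | h
      · exact h4 h
      · have : pvBS pos calls lo mid = mid := by omega
        rw [this]; exact hc
    · simp only [hc, if_false]
      obtain ⟨h1, h2, h3, h4⟩ := pvBS_spec pos calls H (mid + 1) hi (by omega) hhn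
      refine ⟨by omega, h2, fun i hi1 hi2 hci => ?_, h4⟩
      rcases Nat.lt_or_ge i (mid + 1) with h | h
      · exact hc (H i mid (by omega) (by omega) hci)
      · exact h3 i h hi2 hci
  · rw [if_neg hlt]
    exact ⟨le_refl _, hlh, fun i h1 h2 => by omega, fun h => by omega⟩
termination_by lo hi => hi - lo
decreasing_by all_goals omega

-- Sortedness (Pre_) gives the monotonicity pvBS_spec needs.
theorem pvSorted_mono (pos : Int) (calls : List (Int × Int × Int × Int))
    (hpw : List.Pairwise (fun p q => p.1 ≤ q.1 ∧ p.2.1 ≤ q.2.1) calls) :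
    ∀ i j, i ≤ j → j < calls.length →
      (pos < (calls.getD i (0, 0, 0, 0)).1 ∨ pos ≤ (calls.getD i (0, 0, 0, 0)).2.1) →
      (pos < (calls.getD j (0, 0, 0, 0)).1 ∨ pos ≤ (calls.getD j (0, 0, 0, 0)).2.1) := by
  intro i j hij hj hc
  rcases Nat.lt_or_ge i j with hlt | hge
  · have hi : i < calls.length := by omega
    have hR := (List.pairwise_iff_getElem.mp hpw) i j hi hj hlt
    rw [List.getD_eq_getElem calls _ hi] at hc
    rw [List.getD_eq_getElem calls _ hj]
    rcases hc with h | h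
    · exact Or.inl (lt_of_lt_of_le h hR.1)
    · exact Or.inr (le_trans h hR.2)
  · have : i = j := by omega
    subst this; exact hc

-- A's scan equals B's binary-search computation on sorted lists.
theorem pvMain (pos : Int) (calls : List (Int × Int × Int × Int))
    (hPre : List.Pairwise (fun p q => p.1 ≤ q.1 ∧ p.2.1 ≤ q.2.1) calls) :
    pvLoopA pos calls (-1, -1) =
      (if pvBS pos calls 0 calls.length = calls.length then (-1, -1)
       else if (calls.getD (pvBS pos calls 0 calls.length) (0, 0, 0, 0)).1 ≤ pos then
         ((calls.getD (pvBS pos calls 0 calls.length) (0, 0, 0, 0)).2.2.1,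
          (calls.getD (pvBS pos calls 0 calls.length) (0, 0, 0, 0)).2.2.2)
       else if 0 < pvBS pos calls 0 calls.length ∧
           ((calls.getD (pvBS pos calls 0 calls.length - 1) (0, 0, 0, 0)).2.2.1,
            (calls.getD (pvBS pos calls 0 calls.length - 1) (0, 0, 0, 0)).2.2.2) =
           ((calls.getD (pvBS pos calls 0 calls.length) (0, 0, 0, 0)).2.2.1,
            (calls.getD (pvBS pos calls 0 calls.length) (0, 0, 0, 0)).2.2.2) then
         ((calls.getD (pvBS pos calls 0 calls.length) (0, 0, 0, 0)).2.2.1,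
          (calls.getD (pvBS pos calls 0 calls.length) (0, 0, 0, 0)).2.2.2)
       else (-1, -1)) := by
  rw [pvLoopA_eq_crossing pos calls (-1, -1)]
  obtain ⟨hb1, hb2, hb3, hb4⟩ :=
    pvBS_spec pos calls (pvSorted_mono pos calls hPre) 0 calls.length (Nat.zero_le _) (le_refl _)
  by_cases hend : pvBS pos calls 0 calls.length = calls.length
  · -- no crossing interval: findIdx? = none
    have hnone : calls.findIdx? (fun q => pos < q.1 || pos ≤ q.2.1) = none := by
      rw [List.findIdx?_eq_none_iff]
      intro x hx
      obtain ⟨i, hi, hxi⟩ := List.mem_iff_getElem.mp hx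
      have h3 := hb3 i (Nat.zero_le _) (by omega)
      rw [List.getD_eq_getElem calls _ hi, hxi] at h3
      simpa using h3
    rw [hnone, if_pos hend]
  · have hlon : pvBS pos calls 0 calls.length < calls.length := by omega
    have hsome : calls.findIdx? (fun q => pos < q.1 || pos ≤ q.2.1) = some (pvBS pos calls 0 calls.length) := by
      rw [List.findIdx?_eq_some_iff_getElem]
      refine ⟨hlon, ?_, ?_⟩
      · have h4 := hb4 hlon
        rw [List.getD_eq_getElem calls _ hlon] at h4
        simpa using h4
      · intro j hj
        have h3 := hb3 j (Nat.zero_le _) hj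
        rw [List.getD_eq_getElem calls _ (by omega : j < calls.length)] at h3
        simpa using h3
    rw [hsome, if_neg hend]
    dsimp only
    by_cases hqs : (calls.getD (pvBS pos calls 0 calls.length) (0, 0, 0, 0)).1 ≤ pos
    · rw [if_pos hqs, if_pos hqs]
    · rw [if_neg hqs, if_neg hqs]
      by_cases h0 : pvBS pos calls 0 calls.length = 0
      · rw [h0]
        simp only [reduceIte, lt_self_iff_false, false_and, if_false]
        split_ifs with h
        · exact h
        · rfl
      · have hpos : 0 < pvBS pos calls 0 calls.length := by omega
        rw [if_neg h0]
        by_cases heq : ((calls.getD (pvBS pos calls 0 calls.length) (0, 0, 0, 0)).2.2.1, (calls.getD (pvBS pos calls 0 calls.length) (0, 0, 0, 0)).2.2.2) = (calls.getD (pvBS pos calls 0 calls.length - 1) (0, 0, 0, 0)).2.2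
        · rw [if_pos heq, if_pos ⟨hpos, by rw [heq]⟩]
        · rw [if_neg heq, if_neg (by
            intro h
            exact heq (by rw [← h.2]))]

-- ===== VERDICT (by name: the statement is the Claim_ definition above) =====
theorem getCNCallFor_spec : Claim_equal_getCNCallFor := by
  intro chr pos cncalls _hDom hPre
  unfold Spec_getCNCallFor getCNCallFor getCNCallFor_alt
  unfold Pre_getCNCallFor at hPre
  cases hfind : cncalls.find? (fun kv => kv.1 == chr) with
  | none => rfl
  | some kv =>
    rw [hfind] at hPre
    exact pvMain pos kv.2 hPre
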